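-- pv_equiv track=rewrite | github.com/fp-computer-programming/start-s2-labs-P22inolan | Start-s2-labs-4.py | double_every_other
-- ===== SOURCE A (Python) =====
-- def double_every_other(lst):
--     blank = [] # blank list for final numbers
--     for i,v in enumerate(lst): # enumerate the list
--         if i % 2 != 0: # if the index is odd:
--             blank.append(lst[i] * 2) # append number * 2 to new list
--         else:
--             blank.append(lst[i]) # append even numbers to list normally
--     return blank
--     pass
-- ===== SOURCE B (Python) =====
-- def double_every_other(lst):
--     # Pairwise walk: consume two elements per step (keep, double), no parity test;
--     # whatever single element remains is passed through by the tail slice.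
--     out = []
--     i = 0
--     n = len(lst)
--     while i + 1 < n:
--         out.append(lst[i])
--         out.append(lst[i + 1] * 2)
--         i += 2
--     return out + lst[i:]
-- ===== Notes on version B (the rewrite author's own statement) =====
-- stated objective: alternative
-- what changed: Replaces the single enumerate loop with a parity branch on each index by a pairwise index loop that consumes two elements per step (keep first, double second) and passes the leftover single element through a tail slice, with no parity test at all.
import Mathlib
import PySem

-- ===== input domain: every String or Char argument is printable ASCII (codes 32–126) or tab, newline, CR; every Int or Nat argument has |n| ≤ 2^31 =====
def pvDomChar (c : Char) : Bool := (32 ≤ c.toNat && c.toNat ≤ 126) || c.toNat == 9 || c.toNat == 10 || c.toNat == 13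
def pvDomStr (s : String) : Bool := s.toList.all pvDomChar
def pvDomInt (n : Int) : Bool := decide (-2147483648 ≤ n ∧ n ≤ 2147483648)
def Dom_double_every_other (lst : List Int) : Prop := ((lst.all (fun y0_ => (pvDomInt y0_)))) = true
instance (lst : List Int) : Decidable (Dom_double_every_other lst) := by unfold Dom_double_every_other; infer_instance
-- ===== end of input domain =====

-- Equivalence of an enumerate-with-parity-branch loop (A) with a pairwise index loop (B) that
-- consumes two elements per step (keep, double) and passes the leftover tail through a slice
-- (objective: alternative decomposition, same result on every list).


-- ===== PORT A =====
-- for i,v in enumerate(lst): if i % 2 != 0: blank.append(lst[i]*2) else: blank.append(lst[i])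
def double_every_other (lst : List Int) : List Int :=
  (PySem.List.enumerate lst 0).foldl
    (fun blank iv =>
      if PySem.Int.mod iv.1 2 ≠ 0 then blank ++ [PySem.List.pyGetD lst iv.1 0 * 2]
      else blank ++ [PySem.List.pyGetD lst iv.1 0]) []

-- ===== PORT B =====
-- Source B's while loop 'while i + 1 < n: out += [lst[i], lst[i+1]*2]; i += 2' followed by the
-- post-loop 'return out + lst[i:]' (hand-ported step for step; exact: i, n stay Int, the
-- indices hit are always in range so pyGetD is Python's lst[i]).
def pvPairLoop (lst : List Int) (n i : Int) (out : List Int) : List Int :=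
  if i + 1 < n then
    pvPairLoop lst n (i + 2) (out ++ [PySem.List.pyGetD lst i 0, PySem.List.pyGetD lst (i + 1) 0 * 2])
  else out ++ PySem.List.slice lst (some i) none
termination_by (n - i).toNat
decreasing_by omega

def double_every_other_alt (lst : List Int) : List Int :=
  pvPairLoop lst (PySem.List.len lst) 0 []

-- ===== PRECONDITION & SPEC =====
def Spec_double_every_other (lst : List Int) (out : List Int) : Prop := out = double_every_other_alt lst
instance (lst : List Int) (out : List Int) : Decidable (Spec_double_every_other lst out) := by unfold Spec_double_every_other; infer_instance

-- ===== CLAIM (what is proved, stated in full; the proofs are below) =====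
def Claim_equal_double_every_other : Prop := ∀ (lst : List Int), Dom_double_every_other lst → Spec_double_every_other lst (double_every_other lst)

-- ===== LEMMAS AND PROOFS =====

-- Proof-side normal form: the pairwise shape both programs compute.
def pairDouble : List Int → List Int
  | a :: b :: rest => a :: b * 2 :: pairDouble rest
  | xs => xs

-- A's loop appends one element per enumerate pair; since lst[i] = v for (i, v) ∈ enumerate lst,
-- the fold is a map over the enumeration.
lemma double_every_other_eq_map (L : List Int) :
    double_every_other L = (PySem.List.enumerate L 0).map
      (fun iv => if PySem.Int.mod iv.1 2 ≠ 0 then iv.2 * 2 else iv.2) := by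
  unfold double_every_other
  rw [PySem.List.foldl_congr_mem _ _
      (fun blank iv => blank ++ [if PySem.Int.mod iv.1 2 ≠ 0 then iv.2 * 2 else iv.2]) []]
  · simpa using PySem.List.foldl_append_singleton_eq_map
      (fun iv : Int × Int => if PySem.Int.mod iv.1 2 ≠ 0 then iv.2 * 2 else iv.2) _ []
  · intro acc x hx
    rcases (PySem.List.mem_enumerate_iff _ _ _).1 hx with ⟨k, hk, rfl⟩
    split <;> simp [List.getElem?_eq_getElem hk]

-- Mapping the parity doubling over an enumeration starting at any even index is the pairwise shape.
lemma map_enum_eq_pairDouble (L : List Int) : ∀ (s : Int), s % 2 = 0 →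
    (PySem.List.enumerate L s).map
      (fun iv => if PySem.Int.mod iv.1 2 ≠ 0 then iv.2 * 2 else iv.2) = pairDouble L := by
  have h2 : (0:Int) < 2 := by norm_num
  induction L using pairDouble.induct with
  | case1 a b rest ih =>
    intro s hs
    rw [PySem.List.enumerate_cons, PySem.List.enumerate_cons]
    have hs1 : PySem.Int.mod (s + 1) 2 ≠ 0 := by rw [PySem.Int.mod_eq_emod_of_pos h2]; omega
    simp only [List.map_cons]
    rw [if_neg (by rw [PySem.Int.mod_eq_emod_of_pos h2]; omega), if_pos hs1,
      ih (s + 1 + 1) (by omega)]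
    rfl
  | case2 xs h =>
    intro s hs
    rcases xs with _ | ⟨x, _ | ⟨y, r⟩⟩
    · simp [pairDouble]
    · simp only [PySem.List.enumerate_cons, PySem.List.enumerate_nil, List.map_cons, List.map_nil]
      rw [if_neg (by rw [PySem.Int.mod_eq_emod_of_pos h2]; omega)]
      simp [pairDouble]
    · exact (h x y r rfl).elim

-- Loop invariant for B: with 'pre' already consumed (i = len pre), the loop appends
-- pairDouble of the remaining suffix to 'out'.
lemma pvPairLoop_spec (rest : List Int) : ∀ (pre out : List Int),
    pvPairLoop (pre ++ rest) (PySem.List.len (pre ++ rest)) (pre.length : Int) out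
      = out ++ pairDouble rest := by
  induction rest using pairDouble.induct with
  | case1 a b r ih =>
    intro pre out
    rw [pvPairLoop]
    rw [if_pos (by simp only [PySem.List.len_eq, List.length_append, List.length_cons]; push_cast; omega)]
    have h1 : PySem.List.pyGetD (pre ++ a :: b :: r) (pre.length : Int) 0 = a := by
      simp [PySem.List.pyGetD_natCast]
    have h2 : PySem.List.pyGetD (pre ++ a :: b :: r) ((pre.length : Int) + 1) 0 = b := by
      rw [show ((pre.length : Int) + 1) = (((pre ++ [a]).length : Nat) : Int) by simp,
        PySem.List.pyGetD_natCast,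
        show pre ++ a :: b :: r = (pre ++ [a]) ++ b :: r by simp]
      simp [List.getD_eq_getElem?_getD]
    rw [h1, h2]
    have hi : (pre.length : Int) + 2 = (((pre ++ [a, b]).length : Nat) : Int) := by
      rw [show (pre ++ [a, b]).length = pre.length + 2 from by simp]; push_cast; ring
    have hl : pre ++ a :: b :: r = (pre ++ [a, b]) ++ r := by simp
    rw [hi, hl, ih (pre ++ [a, b]) (out ++ [a, b * 2])]
    simp [pairDouble]
  | case2 xs h =>
    intro pre out
    rw [pvPairLoop]
    rw [if_neg (by
      rcases xs with _ | ⟨x, _ | ⟨y, r⟩⟩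
      · simp only [PySem.List.len_eq, List.length_append, List.length_nil]; push_cast; omega
      · simp only [PySem.List.len_eq, List.length_append, List.length_cons, List.length_nil]
        push_cast; omega
      · exact (h x y r rfl).elim)]
    rw [PySem.List.slice_from_natCast]
    rcases xs with _ | ⟨x, _ | ⟨y, r⟩⟩
    · simp [pairDouble]
    · simp [pairDouble]
    · exact (h x y r rfl).elim

lemma double_every_other_alt_eq_pairDouble (lst : List Int) :
    double_every_other_alt lst = pairDouble lst := by
  simpa using pvPairLoop_spec lst [] []

-- ===== VERDICT (by name: the statement is the Claim_ definition above) =====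
theorem double_every_other_spec : Claim_equal_double_every_other := by
  intro lst _
  unfold Spec_double_every_other
  rw [double_every_other_eq_map, double_every_other_alt_eq_pairDouble]
  exact map_enum_eq_pairDouble lst 0 (by decide)
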